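-- pv_equiv track=rewrite | github.com/andrewkimswe/programmers_2026 | 프로그래머스/1/42862. 체육복/체육복.py | solution
-- ===== SOURCE A (Python) =====
-- def solution(n, lost, reserve):
--     actual_lost = sorted(list(set(lost) - set(reserve)))
--     actual_reserve = set(reserve) - set(lost)
--
--     lost_count = len(actual_lost)
--
--     for student in actual_lost:
--         if student - 1 in actual_reserve:
--             actual_reserve.remove(student - 1)
--             lost_count -= 1
--         elif student + 1 in actual_reserve:
--             actual_reserve.remove(student + 1)
--             lost_count -= 1
--
--     return n - lost_count
-- ===== SOURCE B (Python) =====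
-- def solution(n, lost, reserve):
--     L = sorted(set(lost) - set(reserve))
--     R = sorted(set(reserve) - set(lost))
--     matched = 0
--     i = j = 0
--     while i < len(L) and j < len(R):
--         if R[j] < L[i] - 1:
--             j += 1
--         elif R[j] <= L[i] + 1:
--             matched += 1
--             i += 1
--             j += 1
--         else:
--             i += 1
--     return n - len(L) + matched
-- ===== Notes on version B (the rewrite author's own statement) =====
-- stated objective: alternative
-- what changed: Replaces A's hash-set membership/removal greedy over the sorted lost list by a two-pointer merge of the two sorted symmetric-difference lists, so no set is mutated during the scan.
import Mathlib
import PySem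

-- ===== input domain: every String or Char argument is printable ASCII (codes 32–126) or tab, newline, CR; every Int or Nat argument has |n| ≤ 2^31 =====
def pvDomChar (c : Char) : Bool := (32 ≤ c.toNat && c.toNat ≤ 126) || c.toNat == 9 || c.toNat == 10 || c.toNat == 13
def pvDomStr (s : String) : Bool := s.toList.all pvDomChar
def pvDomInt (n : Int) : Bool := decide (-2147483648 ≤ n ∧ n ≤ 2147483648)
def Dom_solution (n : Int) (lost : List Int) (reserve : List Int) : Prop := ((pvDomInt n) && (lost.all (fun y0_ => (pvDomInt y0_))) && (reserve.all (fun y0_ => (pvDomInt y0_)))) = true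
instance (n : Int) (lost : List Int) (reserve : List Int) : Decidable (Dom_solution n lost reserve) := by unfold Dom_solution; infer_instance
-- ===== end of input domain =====

-- B replaces A's set-membership greedy over the lost list by a two-pointer merge
-- of the two sorted symmetric-difference lists (objective: alternative, same cost).

-- ===== PORT A =====
-- A's for-loop over actual_lost carrying (actual_reserve, lost_count); 'remove' is
-- only reached after the membership test, so it equals Set.discard there (exact).
def solution (n : Int) (lost : List Int) (reserve : List Int) : Int :=
  let actualLost : List Int :=
    PySem.List.sorted (PySem.Set.diff (PySem.Set.ofList lost) (PySem.Set.ofList reserve)) (fun x => x) false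
  let actualReserve : PySem.Set Int := PySem.Set.diff (PySem.Set.ofList reserve) (PySem.Set.ofList lost)
  let lostCount : Int := actualLost.length
  let res := actualLost.foldl (fun (st : PySem.Set Int × Int) student =>
      if PySem.Set.contains st.1 (student - 1) then (PySem.Set.discard st.1 (student - 1), st.2 - 1)
      else if PySem.Set.contains st.1 (student + 1) then (PySem.Set.discard st.1 (student + 1), st.2 - 1)
      else st) (actualReserve, lostCount)
  n - res.2

-- ===== PORT B =====
-- Source B's while loop over indices i, j with its counter 'matched'
def matchLoop (L R : List Int) (i j : Nat) (matched : Int) : Int :=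
  if h : i < L.length ∧ j < R.length then
    if R[j]'h.2 < L[i]'h.1 - 1 then matchLoop L R i (j+1) matched
    else if R[j]'h.2 ≤ L[i]'h.1 + 1 then matchLoop L R (i+1) (j+1) (matched+1)
    else matchLoop L R (i+1) j matched
  else matched
termination_by (L.length - i) + (R.length - j)

def solution_alt (n : Int) (lost : List Int) (reserve : List Int) : Int :=
  let L : List Int :=
    PySem.List.sorted (PySem.Set.diff (PySem.Set.ofList lost) (PySem.Set.ofList reserve)) (fun x => x) false
  let R : List Int :=
    PySem.List.sorted (PySem.Set.diff (PySem.Set.ofList reserve) (PySem.Set.ofList lost)) (fun x => x) false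
  n - L.length + matchLoop L R 0 0 0

-- ===== PRECONDITION & SPEC =====
def Spec_solution (n : Int) (lost : List Int) (reserve : List Int) (out : Int) : Prop := out = solution_alt n lost reserve
instance (n : Int) (lost : List Int) (reserve : List Int) (out : Int) : Decidable (Spec_solution n lost reserve out) := by unfold Spec_solution; infer_instance

-- ===== CLAIM (what is proved, stated in full; the proofs are below) =====
def Claim_equal_solution : Prop := ∀ (n : Int) (lost : List Int) (reserve : List Int), Dom_solution n lost reserve → Spec_solution n lost reserve (solution n lost reserve)

-- ===== LEMMAS AND PROOFS =====

-- suffix-list form of B's index loop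
def twoP : List Int → List Int → Int
  | [], _ => 0
  | _ :: _, [] => 0
  | s :: L, r :: R =>
      if r < s - 1 then twoP (s :: L) R
      else if r ≤ s + 1 then 1 + twoP L R
      else twoP L (r :: R)
termination_by L R => L.length + R.length

-- number of matches A's greedy makes
def greedyCnt : List Int → PySem.Set Int → Int
  | [], _ => 0
  | s :: L, R =>
      if PySem.Set.contains R (s - 1) then 1 + greedyCnt L (PySem.Set.discard R (s - 1))
      else if PySem.Set.contains R (s + 1) then 1 + greedyCnt L (PySem.Set.discard R (s + 1))
      else greedyCnt L R

theorem twoP_nil_right (L : List Int) : twoP L [] = 0 := by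
  cases L <;> simp [twoP]

theorem contains_nil (x : Int) : PySem.Set.contains ([] : List Int) x = false := by
  apply Bool.eq_false_iff.mpr
  intro hc
  exact List.not_mem_nil ((PySem.Set.contains_iff _ _).mp hc)

theorem greedyCnt_nil_right (L : List Int) : greedyCnt L [] = 0 := by
  induction L with
  | nil => rfl
  | cons s L ih =>
      rw [greedyCnt, contains_nil, contains_nil]
      simpa using ih

theorem contains_cons_of_ne (R : List Int) (r x : Int) (h : x ≠ r) :
    PySem.Set.contains (r :: R) x = PySem.Set.contains R x := by
  cases h' : PySem.Set.contains R x with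
  | true => exact (PySem.Set.contains_iff _ _).mpr (List.mem_cons_of_mem _ ((PySem.Set.contains_iff _ _).mp h'))
  | false =>
      apply Bool.eq_false_iff.mpr
      intro hc
      rcases List.mem_cons.mp ((PySem.Set.contains_iff _ _).mp hc) with he | hm
      · exact h he
      · exact Bool.eq_false_iff.mp h' ((PySem.Set.contains_iff _ _).mpr hm)

theorem contains_eq_of_perm {R R' : List Int} (hp : R.Perm R') (x : Int) :
    PySem.Set.contains R x = PySem.Set.contains R' x := by
  cases h' : PySem.Set.contains R' x with
  | true => exact (PySem.Set.contains_iff _ _).mpr (hp.mem_iff.mpr ((PySem.Set.contains_iff _ _).mp h'))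
  | false =>
      exact Bool.eq_false_iff.mpr fun hc =>
        Bool.eq_false_iff.mp h' ((PySem.Set.contains_iff _ _).mpr (hp.mem_iff.mp ((PySem.Set.contains_iff _ _).mp hc)))

theorem contains_false_of_forall (R : List Int) (x : Int) (h : x ∉ R) :
    PySem.Set.contains R x = false :=
  Bool.eq_false_iff.mpr fun hc => h ((PySem.Set.contains_iff _ _).mp hc)

theorem discard_cons_of_ne (R : List Int) (r x : Int) (h : x ≠ r) :
    PySem.Set.discard (r :: R) x = r :: PySem.Set.discard R x := by
  simp [PySem.Set.discard, Ne.symm h]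

theorem discard_cons_self_of_not_mem (R : List Int) (r : Int) (h : r ∉ R) :
    PySem.Set.discard (r :: R) r = R := by
  simp only [PySem.Set.discard, List.filter_cons]
  rw [if_neg (by simp)]
  exact List.filter_eq_self.mpr fun x hx => by
    simp only [Bool.not_eq_eq_eq_not, Bool.not_true, beq_eq_false_iff_ne, ne_eq]
    exact fun he => h (he ▸ hx)

theorem foldA_snd (L : List Int) : ∀ (R : PySem.Set Int) (c : Int),
    (L.foldl (fun (st : PySem.Set Int × Int) student =>
      if PySem.Set.contains st.1 (student - 1) then (PySem.Set.discard st.1 (student - 1), st.2 - 1)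
      else if PySem.Set.contains st.1 (student + 1) then (PySem.Set.discard st.1 (student + 1), st.2 - 1)
      else st) (R, c)).2 = c - greedyCnt L R := by
  induction L with
  | nil => intro R c; simp [greedyCnt]
  | cons s L ih =>
      intro R c
      rw [List.foldl_cons, greedyCnt]
      dsimp only
      by_cases h1 : PySem.Set.contains R (s - 1) = true
      · rw [if_pos h1, if_pos h1, ih]; ring
      · rw [if_neg h1, if_neg h1]
        by_cases h2 : PySem.Set.contains R (s + 1) = true
        · rw [if_pos h2, if_pos h2, ih]; ring
        · rw [if_neg h2, if_neg h2, ih]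

theorem matchLoop_eq (L R : List Int) (i j : Nat) (m : Int) :
    matchLoop L R i j m = m + twoP (L.drop i) (R.drop j) := by
  fun_induction matchLoop L R i j m with
  | case1 i j m h h1 ih =>
      rw [ih, List.drop_eq_getElem_cons h.1, List.drop_eq_getElem_cons h.2, twoP, if_pos h1]
  | case2 i j m h h1 h2 ih =>
      rw [ih, List.drop_eq_getElem_cons h.1, List.drop_eq_getElem_cons h.2, twoP,
        if_neg h1, if_pos h2]; ring
  | case3 i j m h h1 h2 ih =>
      rw [ih, List.drop_eq_getElem_cons h.1, List.drop_eq_getElem_cons h.2, twoP, if_neg h1, if_neg h2]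
  | case4 i j m h =>
      rcases Nat.lt_or_ge i L.length with hi | hi
      · have hj : R.length ≤ j := by omega
        rw [List.drop_of_length_le hj, twoP_nil_right]; ring
      · rw [List.drop_of_length_le hi]; simp [twoP]

-- a reserve id smaller than every lost id minus one is never consulted
theorem greedyCnt_drop (L : List Int) : ∀ (R : List Int) (r : Int),
    (∀ x ∈ L, r ≠ x - 1 ∧ r ≠ x + 1) → greedyCnt L (r :: R) = greedyCnt L R := by
  induction L with
  | nil => intro R r _; rfl
  | cons s L ih =>
      intro R r hr
      have hs := hr s (by simp)
      have htl : ∀ x ∈ L, r ≠ x - 1 ∧ r ≠ x + 1 := fun x hx => hr x (by simp [hx])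
      rw [greedyCnt, greedyCnt,
        contains_cons_of_ne R r (s - 1) (Ne.symm hs.1),
        contains_cons_of_ne R r (s + 1) (Ne.symm hs.2),
        discard_cons_of_ne R r (s - 1) (Ne.symm hs.1),
        discard_cons_of_ne R r (s + 1) (Ne.symm hs.2)]
      split_ifs <;> rw [ih _ _ htl]

theorem greedyCnt_perm (L : List Int) : ∀ (R R' : List Int), R.Perm R' →
    greedyCnt L R = greedyCnt L R' := by
  induction L with
  | nil => intro _ _ _; rfl
  | cons s L ih =>
      intro R R' hp
      rw [greedyCnt, greedyCnt, contains_eq_of_perm hp (s - 1), contains_eq_of_perm hp (s + 1)]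
      have hd1 : (PySem.Set.discard R (s - 1)).Perm (PySem.Set.discard R' (s - 1)) := hp.filter _
      have hd2 : (PySem.Set.discard R (s + 1)).Perm (PySem.Set.discard R' (s + 1)) := hp.filter _
      split_ifs
      · rw [ih _ _ hd1]
      · rw [ih _ _ hd2]
      · rw [ih _ _ hp]

theorem greedyCnt_eq_twoP (L R : List Int)
    (hL : L.Pairwise (· < ·)) (hR : R.Pairwise (· < ·))
    (hdisj : ∀ x ∈ L, x ∉ R) : greedyCnt L R = twoP L R := by
  fun_induction twoP L R with
  | case1 R => rfl
  | case2 s L => rw [greedyCnt_nil_right]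
  | case3 s L r R h1 ih =>
      -- r < s - 1: r is useless everywhere, drop it from the reserve
      have hLlo : ∀ x ∈ s :: L, s ≤ x := by
        intro x hx
        rcases List.mem_cons.mp hx with he | hm
        · omega
        · exact le_of_lt (List.rel_of_pairwise_cons hL hm)
      rw [greedyCnt_drop _ _ _ (by intro x hx; have := hLlo x hx; omega)]
      exact ih hL hR.of_cons (by intro x hx hm; exact hdisj x hx (List.mem_cons_of_mem _ hm))
  | case4 s L r R h1 h2 ih =>
      -- s - 1 ≤ r ≤ s + 1, and r ≠ s by disjointness: a match on both sides
      have hrs : r ≠ s := fun he => hdisj s (by simp) (by simp [he.symm])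
      have hRhi : ∀ x ∈ R, r < x := fun x hx => List.rel_of_pairwise_cons hR hx
      have hrR : r ∉ R := fun hx => absurd (hRhi r hx) (lt_irrefl r)
      have hdisc := discard_cons_self_of_not_mem R r hrR
      have ihres := ih hL.of_cons hR.of_cons
        (by intro x hx hm; exact hdisj x (List.mem_cons_of_mem _ hx) (List.mem_cons_of_mem _ hm))
      rcases (by omega : r = s - 1 ∨ r = s + 1) with he | he
      · have hm1 : PySem.Set.contains (r :: R) (s - 1) = true :=
          (PySem.Set.contains_iff _ _).mpr (by rw [← he]; exact List.mem_cons_self)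
        rw [greedyCnt, if_pos hm1, ← he, hdisc, ihres]
      · have hm1 : PySem.Set.contains (r :: R) (s - 1) = false := by
          apply contains_false_of_forall
          intro hc
          rcases List.mem_cons.mp hc with h' | h'
          · omega
          · have := hRhi _ h'; omega
        have hm2 : PySem.Set.contains (r :: R) (s + 1) = true :=
          (PySem.Set.contains_iff _ _).mpr (by rw [← he]; exact List.mem_cons_self)
        rw [greedyCnt, if_neg (ne_true_of_eq_false hm1), if_pos hm2, ← he, hdisc, ihres]
  | case5 s L r R h1 h2 ih =>
      -- r > s + 1: s cannot be matched at all
      have hRhi : ∀ x ∈ r :: R, s + 1 < x := by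
        intro x hx
        rcases List.mem_cons.mp hx with he | hx
        · omega
        · have := List.rel_of_pairwise_cons hR hx; omega
      have hm1 : PySem.Set.contains (r :: R) (s - 1) = false :=
        contains_false_of_forall _ _ fun hc => by have := hRhi _ hc; omega
      have hm2 : PySem.Set.contains (r :: R) (s + 1) = false :=
        contains_false_of_forall _ _ fun hc => by have := hRhi _ hc; omega
      rw [greedyCnt, if_neg (ne_true_of_eq_false hm1), if_neg (ne_true_of_eq_false hm2)]
      exact ih hL.of_cons hR fun x hx => hdisj x (List.mem_cons_of_mem _ hx)

-- a sorted Nodup Int list is strictly increasing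
theorem sorted_strict (xs : List Int) (h : xs.Nodup) :
    (PySem.List.sorted xs (fun x => x) false).Pairwise (· < ·) := by
  have hle := PySem.List.sorted_pairwise (xs := xs) (key := fun x => x) (κ := Int)
  have hnd : (PySem.List.sorted xs (fun x => x) false).Nodup :=
    (PySem.List.sorted_perm xs (fun x => x) false).nodup_iff.mpr h
  have hne : (PySem.List.sorted xs (fun x => x) false).Pairwise (· ≠ ·) := hnd
  exact (hle.and hne).imp (by intro a b hab; exact lt_of_le_of_ne hab.1 hab.2)

-- ===== VERDICT (by name: the statement is the Claim_ definition above) =====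
theorem solution_spec : Claim_equal_solution := by
  intro n lost reserve _
  unfold Spec_solution solution solution_alt
  dsimp only
  set Ld := PySem.Set.diff (PySem.Set.ofList lost) (PySem.Set.ofList reserve) with hLd
  set Rd := PySem.Set.diff (PySem.Set.ofList reserve) (PySem.Set.ofList lost) with hRd
  set L := PySem.List.sorted Ld (fun x => x) false with hL
  set R := PySem.List.sorted Rd (fun x => x) false with hR
  have hLdnd : Ld.Nodup := PySem.Set.nodup_diff _ _ (PySem.Set.nodup_ofList lost)
  have hRdnd : Rd.Nodup := PySem.Set.nodup_diff _ _ (PySem.Set.nodup_ofList reserve)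
  have hLs : L.Pairwise (· < ·) := sorted_strict Ld hLdnd
  have hRs : R.Pairwise (· < ·) := sorted_strict Rd hRdnd
  have hdisj : ∀ x ∈ L, x ∉ R := by
    intro x hxL hxR
    have h1 : x ∈ Ld := (PySem.List.mem_sorted _ _ _ _).mp hxL
    have h2 : x ∈ Rd := (PySem.List.mem_sorted _ _ _ _).mp hxR
    rw [hLd, PySem.Set.mem_diff] at h1
    rw [hRd, PySem.Set.mem_diff] at h2
    exact h1.2 h2.1
  rw [foldA_snd, matchLoop_eq, List.drop_zero, List.drop_zero,
    greedyCnt_perm L Rd R ((PySem.List.sorted_perm Rd (fun x => x) false).symm),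
    greedyCnt_eq_twoP L R hLs hRs hdisj]
  ring
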